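-- pv_equiv track=rewrite | github.com/Oded2/Python-Encryption | secretKey.py | isMin
-- ===== SOURCE A (Python) =====
-- def isMin(num, max_num):
--
--     final = 0
--     if (num > 0):
--         for i in range(num):
--             final += 1
--             if final >= max_num:
--                 final = 0
--         return final
--     else:
--         final = max_num
--         for i in range(max_num):
--             final -= 1
--             if (final == 0):
--                 final = max_num
--
--         return final
-- ===== SOURCE B (Python) =====
-- def isMin(num, max_num):
--     if num > 0:
--         return num % max_num if max_num > 0 else 0
--     return max_num
-- ===== Notes on version B (the rewrite author's own statement) =====
-- stated objective: faster
-- what changed: Replaced the O(num)/O(max_num) counting loops with a closed-form modulo expression (num % max_num when num>0 and max_num>0, 0 when max_num<=0, else max_num).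
import Mathlib
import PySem

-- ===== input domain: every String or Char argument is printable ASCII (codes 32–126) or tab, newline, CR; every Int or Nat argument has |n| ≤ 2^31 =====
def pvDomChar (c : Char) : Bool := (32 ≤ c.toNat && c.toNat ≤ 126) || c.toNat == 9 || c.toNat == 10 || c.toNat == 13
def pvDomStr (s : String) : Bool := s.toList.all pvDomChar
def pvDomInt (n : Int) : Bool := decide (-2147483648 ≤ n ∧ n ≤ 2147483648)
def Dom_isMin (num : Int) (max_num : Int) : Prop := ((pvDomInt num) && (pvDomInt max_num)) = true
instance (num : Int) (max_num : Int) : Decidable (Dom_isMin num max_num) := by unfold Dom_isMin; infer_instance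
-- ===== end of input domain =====

-- B replaces A's two counting loops by a closed-form modulo expression (objective: faster).

-- ===== PORT A =====
-- literal transliteration of A: two Python for-loops over range, ported as foldl over List.range
def isMin (num : Int) (max_num : Int) : Int :=
  if num > 0 then
    (List.range num.toNat).foldl
      (fun final _ =>
        let final := final + 1
        if final ≥ max_num then 0 else final) 0
  else
    (List.range max_num.toNat).foldl
      (fun final _ =>
        let final := final - 1
        if final = 0 then max_num else final) max_num

-- ===== PORT B =====
def isMin_alt (num : Int) (max_num : Int) : Int :=
  if num > 0 then
    if max_num > 0 then PySem.Int.mod num max_num else 0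
  else max_num

-- ===== PRECONDITION & SPEC =====
def Spec_isMin (num : Int) (max_num : Int) (out : Int) : Prop := out = isMin_alt num max_num
instance (num : Int) (max_num : Int) (out : Int) : Decidable (Spec_isMin num max_num out) := by unfold Spec_isMin; infer_instance

-- ===== CLAIM (what is proved, stated in full; the proofs are below) =====
def Claim_equal_isMin : Prop := ∀ (num : Int) (max_num : Int), Dom_isMin num max_num → Spec_isMin num max_num (isMin num max_num)

-- ===== LEMMAS AND PROOFS =====

-- increment loop, positive modulus: state after n steps is n % m
theorem pv_up_pos (m : Int) (hm : 0 < m) (n : Nat) :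
    (List.range n).foldl
      (fun final _ => let final := final + 1; if final ≥ m then 0 else final) 0
    = (n : Int) % m := by
  induction n with
  | zero => simp
  | succ k ih =>
    rw [List.range_succ, List.foldl_append, ih]
    simp only [List.foldl_cons, List.foldl_nil]
    have h0 : 0 ≤ (k : Int) % m := Int.emod_nonneg _ (by omega)
    have h1 : (k : Int) % m < m := Int.emod_lt_of_pos _ hm
    have hq := Int.mul_ediv_add_emod (k : Int) m
    have hrepr : ((k + 1 : Nat) : Int) = ((k : Int) % m + 1) + m * ((k : Int) / m) := by
      push_cast; omega
    rw [hrepr, Int.add_mul_emod_self_left]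
    by_cases h : (k : Int) % m + 1 ≥ m
    · have he : (k : Int) % m + 1 = m := by omega
      rw [if_pos h, he, Int.emod_self]
    · rw [if_neg h]
      exact (Int.emod_eq_of_lt (by omega) (by omega)).symm

-- increment loop, non-positive modulus: state is always reset to 0
theorem pv_up_nonpos (m : Int) (hm : m ≤ 0) (n : Nat) :
    (List.range n).foldl
      (fun final _ => let final := final + 1; if final ≥ m then 0 else final) 0
    = 0 := by
  induction n with
  | zero => simp
  | succ k ih =>
    rw [List.range_succ, List.foldl_append, ih]
    simp only [List.foldl_cons, List.foldl_nil]
    rw [if_pos (by omega : (0 : Int) + 1 ≥ m)]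

-- decrement loop: after k ≤ m steps the state is m - k, except when k = m (reset to m)
theorem pv_down (m : Int) (k : Nat) (hk : (k : Int) ≤ m) :
    (List.range k).foldl
      (fun final _ => let final := final - 1; if final = 0 then m else final) m
    = if (k : Int) = m then m else m - k := by
  induction k with
  | zero =>
    simp only [List.range_zero, List.foldl_nil]
    split <;> omega
  | succ j ih =>
    have hj : (j : Int) ≤ m := by omega
    have hj0 : ¬((j : Int) = m) := by omega
    rw [List.range_succ, List.foldl_append, ih hj, if_neg hj0]
    simp only [List.foldl_cons, List.foldl_nil]
    by_cases h : ((j : Int) + 1) = m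
    · have h1 : m - (j : Int) - 1 = 0 := by omega
      have h2 : ((j + 1 : Nat) : Int) = m := by omega
      rw [if_pos h1, if_pos h2]
    · have h1 : ¬(m - (j : Int) - 1 = 0) := by omega
      have h2 : ¬(((j + 1 : Nat) : Int) = m) := by omega
      rw [if_neg h1, if_neg h2]
      push_cast; ring

-- ===== VERDICT (by name: the statement is the Claim_ definition above) =====
theorem isMin_spec : Claim_equal_isMin := by
  intro num max_num _
  unfold Spec_isMin isMin isMin_alt
  by_cases hn : num > 0
  · simp only [hn, if_true]
    by_cases hm : max_num > 0
    · rw [pv_up_pos _ hm, PySem.Int.mod_eq_emod_of_pos hm]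
      simp [hm, Int.toNat_of_nonneg (le_of_lt hn)]
    · rw [pv_up_nonpos _ (by omega)]
      simp [hm]
  · simp only [hn, if_false]
    by_cases hm : 0 < max_num
    · rw [pv_down max_num max_num.toNat (by simp [Int.toNat_of_nonneg (le_of_lt hm)])]
      simp [Int.toNat_of_nonneg (le_of_lt hm)]
    · have : max_num.toNat = 0 := by omega
      simp [this]
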